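-- pv_equiv track=rewrite | github.com/tapan0007/ml_dtypes | compiler/me/me_quantization_utils.py | reorder_parent_names
-- ===== SOURCE A (Python) =====
-- def reorder_parent_names(waveop):
--     prev_waveops_matmul = []
--     prev_waveops_other = []
--     for name in waveop['previous_waveops']:
--         if 'MatMul' in name:
--             prev_waveops_matmul.append(name)
--         else:
--             prev_waveops_other.append(name)
--     new_prev_waveops = []
--     for name in prev_waveops_matmul:
--         new_prev_waveops.append(name)
--     for name in prev_waveops_other:
--         new_prev_waveops.append(name)
--     waveop['previous_waveops'] = new_prev_waveops
--     return waveop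
-- ===== SOURCE B (Python) =====
-- def reorder_parent_names(waveop):
--     waveop['previous_waveops'] = sorted(waveop['previous_waveops'],
--                                         key=lambda n: 'MatMul' not in n)
--     return waveop
-- ===== Notes on version B (the rewrite author's own statement) =====
-- stated objective: simpler
-- what changed: The two-bucket partition with two explicit copy loops is replaced by a single stable sort on the boolean key 'MatMul' not in name, whose tie-preservation gives exactly the same order.
import Mathlib
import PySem

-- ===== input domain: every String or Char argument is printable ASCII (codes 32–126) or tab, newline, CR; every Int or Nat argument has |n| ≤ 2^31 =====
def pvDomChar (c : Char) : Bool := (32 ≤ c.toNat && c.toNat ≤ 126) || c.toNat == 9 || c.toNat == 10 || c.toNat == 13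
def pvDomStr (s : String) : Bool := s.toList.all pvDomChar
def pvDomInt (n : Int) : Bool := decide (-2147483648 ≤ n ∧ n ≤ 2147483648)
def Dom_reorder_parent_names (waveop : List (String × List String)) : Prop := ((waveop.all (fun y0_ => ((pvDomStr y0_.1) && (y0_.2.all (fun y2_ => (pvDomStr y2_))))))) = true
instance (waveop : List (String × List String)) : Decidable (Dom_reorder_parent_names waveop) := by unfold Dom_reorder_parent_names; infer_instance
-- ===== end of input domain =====

-- B replaces A's two-bucket partition and copy loops by one stable sort on the key
-- 'MatMul' not in name; equal return value on every dict carrying 'previous_waveops'.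
-- (A mutates its argument in place; the equivalence here is about the return value.)

-- shared association-list dict helpers (lookup = first match; assignment overwrites in place)
def pvGetPrev (waveop : List (String × List String)) : Option (List String) :=
  (waveop.find? (fun p => p.1 == "previous_waveops")).map (fun p => p.2)

def pvSetPrev (waveop : List (String × List String)) (v : List String) :
    List (String × List String) :=
  waveop.map (fun p => if p.1 == "previous_waveops" then ("previous_waveops", v) else p)

-- ===== PORT A =====
def reorder_parent_names (waveop : List (String × List String)) : List (String × List String) :=
  match pvGetPrev waveop with
  | none => waveop   -- Python raises KeyError here; excluded by Pre_
  | some prev =>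
    -- one loop filling the two buckets
    let buckets := prev.foldl
      (fun (acc : List String × List String) n =>
        if PySem.Str.isIn "MatMul" n then (acc.1 ++ [n], acc.2) else (acc.1, acc.2 ++ [n]))
      ([], [])
    -- two copy loops into new_prev_waveops
    let new1 := buckets.1.foldl (fun acc n => acc ++ [n]) []
    let new2 := buckets.2.foldl (fun acc n => acc ++ [n]) new1
    pvSetPrev waveop new2

-- ===== PORT B =====
def reorder_parent_names_alt (waveop : List (String × List String)) : List (String × List String) :=
  match pvGetPrev waveop with
  | none => waveop   -- Python raises KeyError here; excluded by Pre_
  | some prev =>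
    pvSetPrev waveop (PySem.List.sorted prev (fun n => !(PySem.Str.isIn "MatMul" n)))

-- ===== PRECONDITION & SPEC =====
-- Pre_: the dict must carry the key 'previous_waveops'; otherwise Python A raises KeyError.
def Pre_reorder_parent_names (waveop : List (String × List String)) : Prop :=
  (waveop.any (fun p => p.1 == "previous_waveops")) = true
instance (waveop : List (String × List String)) : Decidable (Pre_reorder_parent_names waveop) := by
  unfold Pre_reorder_parent_names; infer_instance

def pvWitness_reorder_parent_names : (List (String × List String)) :=
  [("previous_waveops", ["a", "MatMul_0", "b"])]

def Spec_reorder_parent_names (waveop : List (String × List String)) (out : List (String × List String)) : Prop := out = reorder_parent_names_alt waveop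
instance (waveop : List (String × List String)) (out : List (String × List String)) : Decidable (Spec_reorder_parent_names waveop out) := by unfold Spec_reorder_parent_names; infer_instance

-- ===== CLAIM (what is proved, stated in full; the proofs are below) =====
def Claim_equal_reorder_parent_names : Prop := ∀ (waveop : List (String × List String)), Dom_reorder_parent_names waveop → Pre_reorder_parent_names waveop → Spec_reorder_parent_names waveop (reorder_parent_names waveop)

-- ===== LEMMAS AND PROOFS =====

-- a stable sort on a boolean key is exactly the stable partition
lemma insertBy_bool_key {α : Type} (key : α → Bool) (x : α) (A B : List α)
    (hA : ∀ a ∈ A, key a = false) (hB : ∀ b ∈ B, key b = true) :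
    PySem.List.insertBy (fun a b => decide (key a < key b)) x (A ++ B) =
      if key x then A ++ B ++ [x] else A ++ x :: B := by
  cases h : key x with
  | true =>
    have hall : ∀ y ∈ A ++ B, (fun a b => decide (key a < key b)) x y = false := by
      intro y _; simp [h]
    rw [PySem.List.insertBy_of_forall_not_before (fun a b => decide (key a < key b)) x (A ++ B) hall]
    simp
  | false =>
    simp only [Bool.false_eq_true, if_false]
    revert hA
    induction A with
    | nil =>
      intro _
      cases B with
      | nil => simp [PySem.List.insertBy]
      | cons b bs =>
        have hb := hB b (by simp)
        simp [PySem.List.insertBy, h, hb]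
    | cons a as ih =>
      intro hA
      have ha := hA a (by simp)
      simp only [List.cons_append, PySem.List.insertBy, h, ha]
      simp only [decide_eq_true_eq]
      rw [if_neg (by simp)]
      simpa using ih (fun a' h' => hA a' (by simp [h']))

lemma foldl_insertBy_bool_key {α : Type} (key : α → Bool) (xs A B : List α)
    (hA : ∀ a ∈ A, key a = false) (hB : ∀ b ∈ B, key b = true) :
    xs.foldl (fun acc x => PySem.List.insertBy (fun a b => decide (key a < key b)) x acc) (A ++ B)
      = (A ++ xs.filter (fun x => !key x)) ++ (B ++ xs.filter key) := by
  induction xs generalizing A B with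
  | nil => simp
  | cons x xs ih =>
    rw [List.foldl_cons, insertBy_bool_key key x A B hA hB]
    cases h : key x with
    | true =>
      have hB' : ∀ b ∈ B ++ [x], key b = true := by
        intro b hb
        rcases List.mem_append.1 hb with h' | h'
        · exact hB b h'
        · simp at h'; simpa [h']
      rw [if_pos rfl, (by simp : A ++ B ++ [x] = A ++ (B ++ [x])), ih A (B ++ [x]) hA hB']
      simp [h]
    | false =>
      have hA' : ∀ a ∈ A ++ [x], key a = false := by
        intro a ha
        rcases List.mem_append.1 ha with h' | h'
        · exact hA a h'
        · simp at h'; simpa [h']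
      rw [if_neg (by simp), (by simp : A ++ x :: B = (A ++ [x]) ++ B), ih (A ++ [x]) B hA' hB]
      simp [h]

lemma sorted_bool_key {α : Type} (key : α → Bool) (xs : List α) :
    PySem.List.sorted xs key false = xs.filter (fun x => !key x) ++ xs.filter key := by
  rw [PySem.List.sorted_eq_foldl_insertBy]
  simpa using foldl_insertBy_bool_key key xs [] [] (by simp) (by simp)

-- A's partition-and-copy equals the two filters
lemma buckets_eq_filters (p : String → Bool) (prev m o : List String) :
    prev.foldl
        (fun (acc : List String × List String) n =>
          if p n then (acc.1 ++ [n], acc.2) else (acc.1, acc.2 ++ [n])) (m, o)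
      = (m ++ prev.filter p, o ++ prev.filter (fun n => !p n)) := by
  induction prev generalizing m o with
  | nil => simp
  | cons x xs ih =>
    cases h : p x <;> simp [h, ih]

lemma copy_loop_eq_append (l acc : List String) :
    l.foldl (fun acc n => acc ++ [n]) acc = acc ++ l := by
  induction l generalizing acc with
  | nil => simp
  | cons x xs ih => simp [ih]

lemma portA_prev_eq (prev : List String) :
    (let buckets := prev.foldl
        (fun (acc : List String × List String) n =>
          if PySem.Str.isIn "MatMul" n then (acc.1 ++ [n], acc.2) else (acc.1, acc.2 ++ [n]))
        ([], []);
     buckets.2.foldl (fun acc n => acc ++ [n]) (buckets.1.foldl (fun acc n => acc ++ [n]) []))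
    = prev.filter (fun n => PySem.Str.isIn "MatMul" n)
      ++ prev.filter (fun n => !PySem.Str.isIn "MatMul" n) := by
  rw [buckets_eq_filters (fun n => PySem.Str.isIn "MatMul" n) prev [] []]
  simp only [copy_loop_eq_append, List.nil_append]

-- ===== VERDICT (by name: the statement is the Claim_ definition above) =====
theorem reorder_parent_names_spec : Claim_equal_reorder_parent_names := by
  intro waveop _ _
  unfold Spec_reorder_parent_names reorder_parent_names reorder_parent_names_alt
  cases h : pvGetPrev waveop with
  | none => rfl
  | some prev =>
    simp only
    rw [portA_prev_eq prev, sorted_bool_key (fun n => !(PySem.Str.isIn "MatMul" n)) prev]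
    simp
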